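-- pv_equiv track=rewrite | github.com/JW0Chao/KS_INDIVIDUAL | run_research_pipeline.py | _parse_index_expr
-- ===== SOURCE A (Python) =====
-- from typing import Any, Dict, List, Optional, Sequence, Set
--
-- def _parse_index_expr(expr: str) -> List[int]:
--     out: List[int] = []
--     seen: Set[int] = set()
--     for raw in expr.split(","):
--         tok = raw.strip()
--         if not tok:
--             continue
--         if "-" in tok:
--             a_str, b_str = tok.split("-", 1)
--             a = int(a_str.strip())
--             b = int(b_str.strip())
--             if b < a:
--                 raise ValueError(f"Invalid range '{tok}': end < start")
--             for i in range(a, b + 1):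
--                 if i not in seen:
--                     seen.add(i)
--                     out.append(i)
--         else:
--             i = int(tok)
--             if i not in seen:
--                 seen.add(i)
--                 out.append(i)
--     if not out:
--         raise ValueError("No sensor indices parsed.")
--     return out
-- ===== SOURCE B (Python) =====
-- def _span(tok):
--     if "-" in tok:
--         a_str, b_str = tok.split("-", 1)
--         a = int(a_str.strip())
--         b = int(b_str.strip())
--         if b < a:
--             raise ValueError(f"Invalid range '{tok}': end < start")
--         return a, b
--     i = int(tok)
--     return i, i
--
--
-- def _parse_index_expr(expr):
--     spans = [_span(raw.strip()) for raw in expr.split(",") if raw.strip()]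
--     flat = [i for a, b in spans for i in range(a, b + 1)]
--     # first-occurrence index of each value, with no membership test anywhere:
--     # overwrite positions right-to-left, then order values by that index.
--     first = {}
--     for pos, v in reversed(list(enumerate(flat))):
--         first[v] = pos
--     out = sorted(first, key=first.get)
--     if not out:
--         raise ValueError("No sensor indices parsed.")
--     return out
-- ===== Notes on version B (the rewrite author's own statement) =====
-- stated objective: alternative
-- what changed: B stages the work into parse-to-spans, flatten, and a dedup that uses no membership test at all: a dict of first-occurrence positions built by overwriting right-to-left over reversed(enumerate(flat)), then sorting the distinct values by that position - instead of A's single loop that interleaves parsing with an inline seen-set dedup.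
import Mathlib
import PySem

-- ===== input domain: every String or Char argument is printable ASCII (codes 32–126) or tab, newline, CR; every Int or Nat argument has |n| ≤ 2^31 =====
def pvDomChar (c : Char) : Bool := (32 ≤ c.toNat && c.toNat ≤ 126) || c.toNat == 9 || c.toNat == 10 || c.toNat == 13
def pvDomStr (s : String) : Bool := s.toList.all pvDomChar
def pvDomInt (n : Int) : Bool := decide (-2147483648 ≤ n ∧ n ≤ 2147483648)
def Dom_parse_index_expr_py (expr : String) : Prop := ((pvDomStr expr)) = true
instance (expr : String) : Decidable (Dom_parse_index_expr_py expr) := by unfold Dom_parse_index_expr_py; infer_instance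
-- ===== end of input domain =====

-- B replaces A's interleaved parse-and-dedup loop (inline seen-set membership tests) with
-- staged passes and a different dedup mechanism: parse tokens to (start,end) spans, flatten,
-- record each value's first-occurrence position by overwriting a dict right-to-left (no
-- membership test anywhere), then sort the distinct values by that position.

-- ===== PORT A =====
def pvAStep (acc : Option (List Int × PySem.Set Int)) (raw : List Char) :
    Option (List Int × PySem.Set Int) :=
  match acc with
  | none => none
  | some (out, seen) =>
    let tok := PySem.Chars.strip raw
    if tok.isEmpty then some (out, seen)
    else if PySem.Chars.isIn ['-'] tok then
      match PySem.Chars.splitOnMax tok ['-'] 1 with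
      | [a_str, b_str] =>
        match PySem.Int.ofChars? (PySem.Chars.strip a_str),
              PySem.Int.ofChars? (PySem.Chars.strip b_str) with
        | some a, some b =>
          if b < a then none   -- raise ValueError: end < start
          else some ((PySem.List.pyRange a (b + 1) 1).foldl
              (fun p i => if PySem.Set.contains p.2 i then p
                          else (p.1 ++ [i], PySem.Set.add p.2 i)) (out, seen))
        | _, _ => none         -- int() ValueError
      | _ => none              -- unreachable unpack failure
    else
      match PySem.Int.ofChars? tok with
      | some i => some (if PySem.Set.contains seen i then (out, seen)
                        else (out ++ [i], PySem.Set.add seen i))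
      | none => none           -- int() ValueError

def parse_index_expr_py (expr : String) : List Int :=
  match (PySem.Chars.splitOn expr.toList [',']).foldl pvAStep
        (some (([] : List Int), (PySem.Set.empty : PySem.Set Int))) with
  | none => []
  | some (out, _) => if out.isEmpty then [] else out   -- raise "No sensor indices parsed."

-- ===== PORT B =====
def pvTokenSpan (tok : List Char) : Option (Int × Int) :=
  if PySem.Chars.isIn ['-'] tok then
    match PySem.Chars.splitOnMax tok ['-'] 1 with
    | [a_str, b_str] =>
      match PySem.Int.ofChars? (PySem.Chars.strip a_str),
            PySem.Int.ofChars? (PySem.Chars.strip b_str) with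
      | some a, some b => if b < a then none else some (a, b)
      | _, _ => none
    | _ => none
  else (PySem.Int.ofChars? tok).map (fun i => (i, i))

def pvSpans : List (List Char) → Option (List (Int × Int))
  | [] => some []
  | t :: ts =>
    match pvTokenSpan t, pvSpans ts with
    | some s, some ss => some (s :: ss)
    | _, _ => none

-- the 'first' dict of Source B: positions overwritten right-to-left (start index s; Source B uses 0)
def pvFirst (flat : List Int) (s : Int) : PySem.Dict Int Int :=
  (PySem.List.enumerate flat s).reverse.foldl (fun d pv => d.insert pv.2 pv.1) PySem.Dict.empty

def parse_index_expr_py_alt (expr : String) : List Int :=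
  let toks := ((PySem.Chars.splitOn expr.toList [',']).map PySem.Chars.strip).filter
      (fun t => !t.isEmpty)
  match pvSpans toks with
  | none => []
  | some spans =>
    let flat := spans.flatMap (fun p => PySem.List.pyRange p.1 (p.2 + 1) 1)
    let first := pvFirst flat 0
    let out := PySem.List.sorted first.keys (fun v => first.getD v 0)
    if out.isEmpty then [] else out   -- raise "No sensor indices parsed."

-- ===== PRECONDITION & SPEC =====
-- Pre_ excludes exactly the inputs on which Python A raises ValueError: a token whose int()
-- parse fails, a range token with end < start, and expressions with no nonempty token.
def pvTokOK (raw : List Char) : Bool :=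
  let tok := PySem.Chars.strip raw
  if tok.isEmpty then true
  else if PySem.Chars.isIn ['-'] tok then
    match PySem.Chars.splitOnMax tok ['-'] 1 with
    | [a_str, b_str] =>
      match PySem.Int.ofChars? (PySem.Chars.strip a_str),
            PySem.Int.ofChars? (PySem.Chars.strip b_str) with
      | some a, some b => decide (a ≤ b)
      | _, _ => false
    | _ => false
  else (PySem.Int.ofChars? tok).isSome

def Pre_parse_index_expr_py (expr : String) : Prop :=
  ((PySem.Chars.splitOn expr.toList [',']).all pvTokOK
    && (PySem.Chars.splitOn expr.toList [',']).any (fun r => !(PySem.Chars.strip r).isEmpty)) = true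
instance (expr : String) : Decidable (Pre_parse_index_expr_py expr) := by
  unfold Pre_parse_index_expr_py; infer_instance

def pvWitness_parse_index_expr_py : String := "1-3, 5,2"

def Spec_parse_index_expr_py (expr : String) (out : List Int) : Prop := out = parse_index_expr_py_alt expr
instance (expr : String) (out : List Int) : Decidable (Spec_parse_index_expr_py expr out) := by
  unfold Spec_parse_index_expr_py; infer_instance

-- ===== CLAIM (what is proved, stated in full; the proofs are below) =====
def Claim_equal_parse_index_expr_py : Prop := ∀ (expr : String), Dom_parse_index_expr_py expr → Pre_parse_index_expr_py expr → Spec_parse_index_expr_py expr (parse_index_expr_py expr)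

-- ===== LEMMAS AND PROOFS =====

lemma pvOfList_append_singleton (f : List Int) (i : Int) :
    PySem.Set.ofList (f ++ [i]) = PySem.Set.add (PySem.Set.ofList f) i := by
  simp [PySem.Set.ofList_eq_foldl, List.foldl_append]

lemma pvRangeFold (l f : List Int) :
    l.foldl (fun p i => if PySem.Set.contains p.2 i then p
                        else (p.1 ++ [i], PySem.Set.add p.2 i))
        (PySem.Set.ofList f, PySem.Set.ofList f)
      = (PySem.Set.ofList (f ++ l), PySem.Set.ofList (f ++ l)) := by
  induction l generalizing f with
  | nil => simp
  | cons i l ih =>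
    have hstep : (if PySem.Set.contains (PySem.Set.ofList f) i then
          ((PySem.Set.ofList f : List Int), PySem.Set.ofList f)
        else ((PySem.Set.ofList f : List Int) ++ [i], PySem.Set.add (PySem.Set.ofList f) i))
        = (PySem.Set.ofList (f ++ [i]), PySem.Set.ofList (f ++ [i])) := by
      rw [pvOfList_append_singleton]
      by_cases him : i ∈ f <;> simp [PySem.Set.add, him]
    have : f ++ i :: l = (f ++ [i]) ++ l := by simp
    simp only [List.foldl_cons, hstep, this, ih]

lemma pvAStep_none (raws : List (List Char)) : raws.foldl pvAStep none = none := by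
  induction raws with
  | nil => rfl
  | cons r rs ih => simpa [pvAStep] using ih

lemma pvMain (raws : List (List Char)) (f : List Int) :
    raws.foldl pvAStep (some (PySem.Set.ofList f, PySem.Set.ofList f))
      = (pvSpans ((raws.map PySem.Chars.strip).filter (fun t => !t.isEmpty))).map
          (fun spans =>
            (PySem.Set.ofList (f ++ spans.flatMap (fun p => PySem.List.pyRange p.1 (p.2 + 1) 1)),
             PySem.Set.ofList (f ++ spans.flatMap (fun p => PySem.List.pyRange p.1 (p.2 + 1) 1)))) := by
  induction raws generalizing f with
  | nil => simp [pvSpans]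
  | cons raw rs ih =>
    by_cases hemp : (PySem.Chars.strip raw).isEmpty
    · simp only [List.foldl_cons, pvAStep, hemp, if_true, List.map_cons, List.filter_cons,
        Bool.not_true]
      simpa using ih f
    · simp only [List.foldl_cons, List.map_cons, List.filter_cons, hemp, Bool.not_false]
      by_cases hdash : PySem.Chars.isIn ['-'] (PySem.Chars.strip raw)
      · cases hsp : PySem.Chars.splitOnMax (PySem.Chars.strip raw) ['-'] 1 with
        | nil =>
          simp [pvAStep, hemp, hdash, hsp, pvSpans, pvTokenSpan, pvAStep_none]
        | cons x xs =>
          cases xs with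
          | nil => simp [pvAStep, hemp, hdash, hsp, pvSpans, pvTokenSpan, pvAStep_none]
          | cons y ys =>
            cases ys with
            | cons z zs =>
              simp [pvAStep, hemp, hdash, hsp, pvSpans, pvTokenSpan, pvAStep_none]
            | nil =>
              cases ha : PySem.Int.ofChars? (PySem.Chars.strip x) with
              | none => simp [pvAStep, hemp, hdash, hsp, ha, pvSpans, pvTokenSpan, pvAStep_none]
              | some a =>
                cases hb : PySem.Int.ofChars? (PySem.Chars.strip y) with
                | none => simp [pvAStep, hemp, hdash, hsp, ha, hb, pvSpans, pvTokenSpan, pvAStep_none]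
                | some b =>
                  by_cases hba : b < a
                  · simp [pvAStep, hemp, hdash, hsp, ha, hb, hba, pvSpans, pvTokenSpan, pvAStep_none]
                  · simp only [pvAStep, hemp, hdash, hsp, ha, hb, hba, if_false,
                      Bool.false_eq_true, if_true, pvRangeFold]
                    rw [ih (f ++ PySem.List.pyRange a (b + 1) 1)]
                    simp [pvSpans, pvTokenSpan, hdash, hsp, ha, hb, hba]
                    cases pvSpans ((rs.map PySem.Chars.strip).filter (fun t => !t.isEmpty)) with
                    | none => simp
                    | some ss => simp [List.flatMap_cons]
      · cases hi : PySem.Int.ofChars? (PySem.Chars.strip raw) with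
        | none => simp [pvAStep, hemp, hdash, hi, pvSpans, pvTokenSpan, pvAStep_none]
        | some i =>
          have hstep : pvAStep (some (PySem.Set.ofList f, PySem.Set.ofList f)) raw
              = some (PySem.Set.ofList (f ++ [i]), PySem.Set.ofList (f ++ [i])) := by
            rw [pvOfList_append_singleton]
            by_cases him : i ∈ f <;> simp [pvAStep, hemp, hdash, hi, PySem.Set.add, him]
          rw [hstep, ih (f ++ [i])]
          simp [pvSpans, pvTokenSpan, hdash, hi]
          cases pvSpans ((rs.map PySem.Chars.strip).filter (fun t => !t.isEmpty)) with
          | none => simp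
          | some ss =>
            have hr : PySem.List.pyRange i (i + 1) 1 = [i] := by
              rw [PySem.List.pyRange_one_cons (by omega : i < i + 1)]
              simp [PySem.List.pyRange]
            simp [List.flatMap_cons, hr]

-- ----- B's dedup-by-sort equals ordered dedup -----

lemma pvFirst_nil (s : Int) : pvFirst [] s = PySem.Dict.empty := rfl

lemma pvFirst_cons (x : Int) (xs : List Int) (s : Int) :
    pvFirst (x :: xs) s = (pvFirst xs (s + 1)).insert x s := by
  simp [pvFirst, PySem.List.enumerate_cons, List.foldl_append]

lemma pvFirst_get?_lb (xs : List Int) (s v : Int) (h : v ∈ xs) :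
    ∃ k, (pvFirst xs s).get? v = some k ∧ s ≤ k := by
  induction xs generalizing s with
  | nil => simp at h
  | cons x xs ih =>
    rw [pvFirst_cons]
    by_cases hvx : v = x
    · subst hvx; exact ⟨s, PySem.Dict.get?_insert_self _ _ _, le_refl s⟩
    · have hv : v ∈ xs := by simpa [hvx] using h
      obtain ⟨k, hk, hle⟩ := ih (s + 1) hv
      exact ⟨k, by rw [PySem.Dict.get?_insert_of_ne _ _ hvx]; exact hk, by omega⟩

lemma pvFirst_mem_keys (xs : List Int) (s v : Int) :
    v ∈ (pvFirst xs s).keys ↔ v ∈ xs := by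
  induction xs generalizing s with
  | nil => simp [pvFirst_nil, PySem.Dict.keys_empty]
  | cons x xs ih => rw [pvFirst_cons, PySem.Dict.mem_keys_insert]; simp [ih (s + 1)]

lemma pvFirst_nodup_keys (xs : List Int) (s : Int) : (pvFirst xs s).keys.Nodup := by
  induction xs generalizing s with
  | nil => simp [pvFirst_nil, PySem.Dict.keys_empty]
  | cons x xs ih => rw [pvFirst_cons]; exact PySem.Dict.nodup_keys_insert _ _ _ (ih (s + 1))

lemma pvFirst_pairwise (xs : List Int) (s : Int) :
    (PySem.List.dedup xs).Pairwise
      (fun a b => (pvFirst xs s).getD a 0 < (pvFirst xs s).getD b 0) := by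
  induction xs generalizing s with
  | nil => simp [PySem.List.dedup]
  | cons x xs ih =>
    rw [PySem.List.dedup, PySem.Set.ofList_cons, List.pairwise_cons]
    constructor
    · intro b hb
      obtain ⟨hbmem, hbne⟩ := (PySem.Set.mem_discard _ _ _).1 hb
      have hbxs : b ∈ xs := (PySem.Set.mem_ofList _ _).1 hbmem
      obtain ⟨k, hk, hle⟩ := pvFirst_get?_lb xs (s + 1) b hbxs
      rw [pvFirst_cons]
      rw [PySem.Dict.getD_insert, PySem.Dict.getD_insert]
      simp only [if_neg hbne, if_true]
      rw [PySem.Dict.getD_eq_get?_getD, hk]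
      simp only [Option.getD_some]; omega
    · have hsub : (PySem.Set.discard (PySem.Set.ofList xs) x).Sublist (PySem.Set.ofList xs) :=
        List.filter_sublist
      have hp := (ih (s + 1)).sublist hsub
      refine hp.imp_of_mem ?_
      intro a b ha hb hab
      have hax := ((PySem.Set.mem_discard _ _ _).1 ha).2
      have hbx := ((PySem.Set.mem_discard _ _ _).1 hb).2
      rw [pvFirst_cons, PySem.Dict.getD_insert, PySem.Dict.getD_insert,
        if_neg hax, if_neg hbx]
      exact hab

lemma pvSortedDedup (flat : List Int) :
    PySem.List.sorted (pvFirst flat 0).keys (fun v => (pvFirst flat 0).getD v 0)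
      = PySem.List.dedup flat := by
  apply PySem.List.sorted_eq_of_perm_of_pairwise_lt
  · exact (List.perm_ext_iff_of_nodup (PySem.List.nodup_dedup flat)
      (pvFirst_nodup_keys flat 0)).2
      (fun v => by rw [PySem.List.mem_dedup, pvFirst_mem_keys])
  · exact pvFirst_pairwise flat 0

-- ===== VERDICT (by name: the statement is the Claim_ definition above) =====
theorem parse_index_expr_py_spec : Claim_equal_parse_index_expr_py := by
  intro expr _ _
  unfold Spec_parse_index_expr_py parse_index_expr_py parse_index_expr_py_alt
  have h := pvMain (PySem.Chars.splitOn expr.toList [',']) []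
  simp only [List.nil_append] at h
  rw [show (some (([] : List Int), (PySem.Set.empty : PySem.Set Int)))
        = some ((PySem.Set.ofList ([] : List Int) : List Int), PySem.Set.ofList ([] : List Int)) from rfl, h]
  cases hps : pvSpans (((PySem.Chars.splitOn expr.toList [',']).map PySem.Chars.strip).filter
      (fun t => !t.isEmpty)) <;>
    simp [hps, pvSortedDedup, PySem.List.dedup]
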